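-- pv_equiv track=rewrite | github.com/7DongJiaqi/SNN_EMG_detection | preprocess_SPE/DataSplit.py | stLabelsExtraction
-- ===== SOURCE A (Python) =====
-- def stLabelsExtraction(labels, Fs, Win, Step):
--
--     Win = int(Win)
--     Step = int(Step)
--
--     N = len(labels)  # total number of samples
--     curPos = 0
--     countFrames = 0
--
--     stLabels = []
--     while (curPos + Win - 1 < N):  # for each short-term window until the end of signal
--         countFrames += 1
--         x = labels[curPos:curPos + Win]  # get current window
--
--         if x.count(0) > x.count(1):
--             stLabels.append(0)
--         else:
--             stLabels.append(1)
--
--         curPos = curPos + Step  # update window position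
--
--     return stLabels
-- ===== SOURCE B (Python) =====
-- def stLabelsExtraction(labels, Fs, Win, Step):
--     Win = int(Win)
--     Step = int(Step)
--     N = len(labels)
--     # prefix counts: Z[i] / O[i] = number of 0s / 1s among labels[:i]
--     Z = [0]
--     O = [0]
--     for v in labels:
--         Z.append(Z[-1] + (1 if v == 0 else 0))
--         O.append(O[-1] + (1 if v == 1 else 0))
--     stLabels = []
--     pos = 0
--     while pos + Win - 1 < N:
--         hi = pos + Win
--         if Z[hi] - Z[pos] > O[hi] - O[pos]:
--             stLabels.append(0)
--         else:
--             stLabels.append(1)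
--         pos += Step
--     return stLabels
-- ===== Notes on version B (the rewrite author's own statement) =====
-- stated objective: alternative
-- what changed: Replaces the per-window recount (two list.count passes over each Win-sized slice) with prefix-count lists of 0s and 1s built once, so each window's majority is a subtraction of two prefix counts.
-- outside the precondition, e.g. on stLabelsExtraction([0, 1], 0, -1, 1): A returns [0, 1, 1, 1], B raises IndexError
import Mathlib
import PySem

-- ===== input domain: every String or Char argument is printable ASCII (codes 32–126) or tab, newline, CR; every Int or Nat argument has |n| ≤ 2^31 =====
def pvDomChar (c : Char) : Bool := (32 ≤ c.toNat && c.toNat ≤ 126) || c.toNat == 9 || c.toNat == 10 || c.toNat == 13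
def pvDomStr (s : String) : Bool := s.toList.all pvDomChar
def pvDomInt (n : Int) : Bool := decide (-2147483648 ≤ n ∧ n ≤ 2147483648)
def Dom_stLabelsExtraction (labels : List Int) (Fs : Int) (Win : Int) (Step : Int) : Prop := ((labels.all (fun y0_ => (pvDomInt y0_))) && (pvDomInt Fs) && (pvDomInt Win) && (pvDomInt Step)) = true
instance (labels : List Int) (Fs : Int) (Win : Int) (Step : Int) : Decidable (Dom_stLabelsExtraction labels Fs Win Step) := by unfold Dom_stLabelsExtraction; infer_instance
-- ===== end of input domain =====

-- B replaces A's per-window recount of 0s and 1s with prefix-count lists built once,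
-- making each window a subtraction of two prefix counts (objective: alternative algorithm).


-- ===== PORT A =====
-- A's while loop, fuel-bounded (fuel = labels.length + 1 suffices on every input Pre_ admits)
def pvLoopA (labels : List Int) (N Win Step curPos : Int) : Nat → List Int
  | 0 => []
  | fuel + 1 =>
    if curPos + Win - 1 < N then
      (if (PySem.List.slice labels (some curPos) (some (curPos + Win))).count 0 >
          (PySem.List.slice labels (some curPos) (some (curPos + Win))).count 1
       then (0 : Int) else 1) :: pvLoopA labels N Win Step (curPos + Step) fuel
    else []

def stLabelsExtraction (labels : List Int) (Fs : Int) (Win : Int) (Step : Int) : List Int :=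
  pvLoopA labels (labels.length : Int) Win Step 0 (labels.length + 1)

-- ===== PORT B =====
-- prefix-count list of value t: [acc, acc + c1, acc + c2, …] (Source B's Z/O building loop)
def pvPrefix (t : Int) : List Int → Int → List Int
  | [], acc => [acc]
  | v :: rest, acc => acc :: pvPrefix t rest (acc + (if v = t then 1 else 0))

def pvLoopB (Z O : List Int) (N Win Step pos : Int) : Nat → List Int
  | 0 => []
  | fuel + 1 =>
    if pos + Win - 1 < N then
      (if PySem.List.pyGetD Z (pos + Win) 0 - PySem.List.pyGetD Z pos 0 >
          PySem.List.pyGetD O (pos + Win) 0 - PySem.List.pyGetD O pos 0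
       then (0 : Int) else 1) :: pvLoopB Z O N Win Step (pos + Step) fuel
    else []

def stLabelsExtraction_alt (labels : List Int) (Fs : Int) (Win : Int) (Step : Int) : List Int :=
  pvLoopB (pvPrefix 0 labels 0) (pvPrefix 1 labels 0) (labels.length : Int) Win Step 0
    (labels.length + 1)

-- ===== PRECONDITION & SPEC =====
-- Pre_ excludes (a) nonpositive Step when at least one window fits, where A loops forever,
-- and (b) negative Win, outside the natural domain, where A's windows come from Python's
-- negative-slice wraparound and B indexes out of range.
def Pre_stLabelsExtraction (labels : List Int) (Fs : Int) (Win : Int) (Step : Int) : Prop :=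
  0 ≤ Win ∧ (1 ≤ Step ∨ (labels.length : Int) < Win)
instance (labels : List Int) (Fs : Int) (Win : Int) (Step : Int) : Decidable (Pre_stLabelsExtraction labels Fs Win Step) := by unfold Pre_stLabelsExtraction; infer_instance

def pvWitness_stLabelsExtraction : List Int × Int × Int × Int := ([0, 1, 1, 0, 1], 100, 3, 2)

def Spec_stLabelsExtraction (labels : List Int) (Fs : Int) (Win : Int) (Step : Int) (out : List Int) : Prop := out = stLabelsExtraction_alt labels Fs Win Step
instance (labels : List Int) (Fs : Int) (Win : Int) (Step : Int) (out : List Int) : Decidable (Spec_stLabelsExtraction labels Fs Win Step out) := by unfold Spec_stLabelsExtraction; infer_instance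

-- ===== CLAIM (what is proved, stated in full; the proofs are below) =====
def Claim_equal_stLabelsExtraction : Prop := ∀ (labels : List Int) (Fs : Int) (Win : Int) (Step : Int), Dom_stLabelsExtraction labels Fs Win Step → Pre_stLabelsExtraction labels Fs Win Step → Spec_stLabelsExtraction labels Fs Win Step (stLabelsExtraction labels Fs Win Step)

-- ===== LEMMAS AND PROOFS =====

-- the prefix list at index k holds acc plus the count of t among the first k labels
lemma pvPrefix_getD (t : Int) : ∀ (labels : List Int) (k : Nat) (acc : Int), k ≤ labels.length →
    (pvPrefix t labels acc).getD k 0 = acc + (((labels.take k).count t : Nat) : Int) := by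
  intro labels
  induction labels with
  | nil =>
    intro k acc hk
    have hk0 : k = 0 := Nat.le_zero.mp hk
    subst hk0
    simp [pvPrefix]
  | cons v rest ih =>
    intro k acc hk
    cases k with
    | zero => simp [pvPrefix]
    | succ k =>
      simp only [pvPrefix, List.getD_cons_succ, List.take_succ_cons, List.count_cons]
      rw [ih k _ (by simpa using hk)]
      by_cases hv : v = t <;> simp [hv] <;> omega

-- count over a nonneg-bounds slice = difference of counts of prefixes
lemma slice_count (labels : List Int) (t p h : Int) (hp : 0 ≤ p) (hph : p ≤ h) :
    (((PySem.List.slice labels (some p) (some h)).count t : Nat) : Int)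
      = (((labels.take h.toNat).count t : Nat) : Int)
        - (((labels.take p.toNat).count t : Nat) : Int) := by
  rw [PySem.List.slice_toNat labels hp (le_trans hp hph)]
  have hsplit : labels.take h.toNat
      = labels.take p.toNat ++ (labels.drop p.toNat).take (h.toNat - p.toNat) := by
    have he : p.toNat + (h.toNat - p.toNat) = h.toNat := by omega
    rw [← he, List.take_add]
    have he2 : p.toNat + (h.toNat - p.toNat) - p.toNat = h.toNat - p.toNat := by omega
    rw [he2]
  rw [hsplit, List.count_append]
  push_cast
  ring

-- the two fuel loops agree, step for step, when Win ≥ 0 and Step ≥ 1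
lemma loop_eq (labels : List Int) (Win Step : Int) (hW : 0 ≤ Win) (hS : 1 ≤ Step) :
    ∀ (fuel : Nat) (pos : Int), 0 ≤ pos →
      pvLoopA labels (labels.length : Int) Win Step pos fuel
        = pvLoopB (pvPrefix 0 labels 0) (pvPrefix 1 labels 0) (labels.length : Int) Win Step pos
            fuel := by
  intro fuel
  induction fuel with
  | zero => intro pos _; rfl
  | succ fuel ih =>
    intro pos hpos
    simp only [pvLoopA, pvLoopB]
    by_cases hc : pos + Win - 1 < (labels.length : Int)
    · simp only [if_pos hc]
      have hhi : pos + Win ≤ (labels.length : Int) := by omega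
      have hgd : ∀ (t : Int) (i : Int), 0 ≤ i → i ≤ (labels.length : Int) →
          PySem.List.pyGetD (pvPrefix t labels 0) i 0
            = (((labels.take i.toNat).count t : Nat) : Int) := by
        intro t i hi hilen
        lift i to ℕ using hi with n
        rw [PySem.List.pyGetD_natCast, pvPrefix_getD t labels n 0 (by exact_mod_cast hilen)]
        simp
      have hZ : PySem.List.pyGetD (pvPrefix 0 labels 0) (pos + Win) 0
            - PySem.List.pyGetD (pvPrefix 0 labels 0) pos 0
          = (((PySem.List.slice labels (some pos) (some (pos + Win))).count 0 : Nat) : Int) := by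
        rw [hgd 0 (pos + Win) (by omega) hhi, hgd 0 pos hpos (by omega),
          slice_count labels 0 pos (pos + Win) hpos (by omega)]
      have hO : PySem.List.pyGetD (pvPrefix 1 labels 0) (pos + Win) 0
            - PySem.List.pyGetD (pvPrefix 1 labels 0) pos 0
          = (((PySem.List.slice labels (some pos) (some (pos + Win))).count 1 : Nat) : Int) := by
        rw [hgd 1 (pos + Win) (by omega) hhi, hgd 1 pos hpos (by omega),
          slice_count labels 1 pos (pos + Win) hpos (by omega)]
      rw [hZ, hO, ih (pos + Step) (by omega)]
      norm_num
    · simp only [if_neg hc]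

-- ===== VERDICT (by name: the statement is the Claim_ definition above) =====
theorem stLabelsExtraction_spec : Claim_equal_stLabelsExtraction := by
  intro labels Fs Win Step _ hpre
  obtain ⟨hW, hS | hshort⟩ := hpre
  · exact loop_eq labels Win Step hW hS (labels.length + 1) 0 le_rfl
  · -- no window fits: both loops exit immediately
    show stLabelsExtraction labels Fs Win Step = stLabelsExtraction_alt labels Fs Win Step
    unfold stLabelsExtraction stLabelsExtraction_alt
    have hc : ¬ ((0 : Int) + Win - 1 < (labels.length : Int)) := by omega
    simp only [pvLoopA, pvLoopB, if_neg hc]
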